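-- pv_equiv track=rewrite | github.com/serafim228337/-2024 | стеки/html.py | check
-- ===== SOURCE A (Python) =====
-- def check(s):
--     stack1 = []
--     spis = []
--     stack2 = []
--     stack3 = []
--     flag = False
--     word = ""
--     for i in s:
--         if i == "<":
--             stack1.append(i)
--             flag = True
--         elif i == ">":
--             flag = False
--             if len(stack1) == 0:
--                 return False
--             else:
--                 stack1.pop()
--         if flag and i != "<":
--             word += i
--         if len(word) != 0 and not flag:
--             spis.append(word)
--             word = ""
--     for a in spis:
--         if a[0] != "/":
--             stack2.append(1)
--             stack3.append(a)
--         else: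
--             if len(stack3) != 0:
--                 if a[1:] == stack3[-1]:
--                     stack3.pop()
--                 else:
--                     return False
--             if len(stack2) == 0:
--                 return False
--             else:
--                 stack2.pop()
--     return len(stack1) == 0 and len(stack2) == 0
-- ===== SOURCE B (Python) =====
-- def check(s):
--     depth = 0
--     stack = []
--     buf = ""
--     capturing = False
--     for c in s:
--         if c == "<":
--             depth += 1
--             capturing = True
--         elif c == ">":
--             if depth == 0:
--                 return False
--             depth -= 1
--             capturing = False
--             if buf:
--                 if buf[0] == "/":
--                     if not stack or buf[1:] != stack[-1]:
--                         return False
--                     stack.pop()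
--                 else:
--                     stack.append(buf)
--                 buf = ""
--         elif capturing:
--             buf += c
--     return depth == 0 and not stack
-- ===== Notes on version B (the rewrite author's own statement) =====
-- stated objective: simpler
-- what changed: B validates in a single pass with an int depth counter and one stack of open tag names, processing each tag name as soon as it is closed, instead of A's two passes that first build an intermediate tag list plus a character stack and then replay that list against two parallel stacks.
import Mathlib
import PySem

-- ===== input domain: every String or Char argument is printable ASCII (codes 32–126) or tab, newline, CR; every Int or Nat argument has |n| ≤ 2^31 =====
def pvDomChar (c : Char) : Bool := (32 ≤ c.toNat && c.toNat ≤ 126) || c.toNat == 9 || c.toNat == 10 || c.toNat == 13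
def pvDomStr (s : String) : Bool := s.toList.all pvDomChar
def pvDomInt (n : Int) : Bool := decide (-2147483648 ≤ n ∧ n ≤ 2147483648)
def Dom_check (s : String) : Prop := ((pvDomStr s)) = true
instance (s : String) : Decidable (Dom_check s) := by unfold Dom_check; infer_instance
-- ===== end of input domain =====

-- B validates in one pass (depth counter + one stack of open tag names) instead of A's
-- two passes with an intermediate tag list and two parallel stacks; objective: simpler.
-- Python strings internal to the loops are carried as List Char (the .toList side).

-- ===== PORT A =====
-- first loop of A: state (stack1, spis, flag, word); none = the early `return False`
def checkPass1 : List Char → List Char → List (List Char) → Bool → List Char →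
    Option (List Char × List (List Char))
  | [], st1, spis, _, _ => some (st1, spis)
  | i :: rest, st1, spis, flag, word =>
    -- the if/elif on i, updating stack1 and flag (none = `return False` on stray '>')
    match (if i = '<' then some (i :: st1, true)
           else if i = '>' then
             (match st1 with
              | [] => none
              | _ :: t => some (t, false))
           else some (st1, flag) : Option (List Char × Bool)) with
    | none => none
    | some (st1', flag') =>
      -- `if flag and i != "<": word += i`
      let word' := if flag' ∧ i ≠ '<' then word ++ [i] else word
      -- `if len(word) != 0 and not flag: spis.append(word); word = ""`
      if word' ≠ [] ∧ flag' = false then checkPass1 rest st1' (spis ++ [word']) flag' []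
      else checkPass1 rest st1' spis flag' word'

-- second loop of A: state (stack2, stack3); none = the early `return False`
def checkPass2 : List (List Char) → List Int → List (List Char) →
    Option (List Int × List (List Char))
  | [], st2, st3 => some (st2, st3)
  | a :: rest, st2, st3 =>
    if a.head? ≠ some '/' then          -- a[0] != "/" (a is never empty here)
      checkPass2 rest (1 :: st2) (a :: st3)
    else
      match st3 with
      | [] =>                           -- len(stack3) == 0: fall through to the stack2 check
        (match st2 with
         | [] => none
         | _ :: t2 => checkPass2 rest t2 [])
      | top :: t3 =>
        if a.drop 1 = top then          -- a[1:] == stack3[-1]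
          (match st2 with
           | [] => none
           | _ :: t2 => checkPass2 rest t2 t3)
        else none

def check (s : String) : Bool :=
  match checkPass1 s.toList [] [] false [] with
  | none => false
  | some (st1, spis) =>
    match checkPass2 spis [] [] with
    | none => false
    | some (st2, _) => st1.isEmpty && st2.isEmpty

-- ===== PORT B =====
-- single loop of B: depth, stack of open names, capture buffer, capturing flag
def checkLoop : List Char → Int → List (List Char) → List Char → Bool → Bool
  | [], depth, stack, _, _ => decide (depth = 0) && stack.isEmpty
  | c :: rest, depth, stack, buf, cap =>
    if c = '<' then checkLoop rest (depth + 1) stack buf true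
    else if c = '>' then
      if depth = 0 then false
      else
        if buf ≠ [] then
          if buf.head? = some '/' then
            match stack with
            | [] => false
            | top :: t => if buf.drop 1 = top then checkLoop rest (depth - 1) t [] false
                          else false
          else checkLoop rest (depth - 1) (buf :: stack) [] false
        else checkLoop rest (depth - 1) stack buf false
    else if cap then checkLoop rest depth stack (buf ++ [c]) cap
    else checkLoop rest depth stack buf cap

def check_alt (s : String) : Bool := checkLoop s.toList 0 [] [] false

-- ===== PRECONDITION & SPEC =====
def Spec_check (s : String) (out : Bool) : Prop := out = check_alt s
instance (s : String) (out : Bool) : Decidable (Spec_check s out) := by unfold Spec_check; infer_instance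

-- ===== CLAIM (what is proved, stated in full; the proofs are below) =====
def Claim_equal_check : Prop := ∀ (s : String), Dom_check s → Spec_check s (check s)

-- ===== LEMMAS AND PROOFS =====

-- checkPass1's spis parameter is a pure accumulator
theorem checkPass1_spis (cs : List Char) :
    ∀ (st1 : List Char) (spis : List (List Char)) (flag : Bool) (word : List Char),
    checkPass1 cs st1 spis flag word =
      (checkPass1 cs st1 [] flag word).map (fun p => (p.1, spis ++ p.2)) := by
  induction cs with
  | nil => intro st1 spis flag word; simp [checkPass1]
  | cons i rest ih =>
    intro st1 spis flag word
    simp only [checkPass1]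
    split
    · rfl
    · rename_i st1' flag' _
      by_cases h : ((if flag' ∧ i ≠ '<' then word ++ [i] else word) ≠ [] ∧ flag' = false)
      · rw [if_pos h, if_pos h]
        conv_lhs => rw [ih]
        conv_rhs => rw [ih]
        cases checkPass1 rest st1' [] flag' [] <;> simp
      · rw [if_neg h, if_neg h, ih]

-- main simulation: B's single loop equals A's "finish pass 1, then run pass 2 from here"
theorem checkLoop_sim (cs : List Char) :
    ∀ (st1 : List Char) (st2 : List Int) (st3 : List (List Char)) (flag : Bool)
      (word : List Char),
    st2.length = st3.length →
    (flag = false → word = []) →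
    checkLoop cs (st1.length : Int) st3 word flag =
      (match checkPass1 cs st1 [] flag word with
       | none => false
       | some (st1', spis) =>
         match checkPass2 spis st2 st3 with
         | none => false
         | some (st2', _) => st1'.isEmpty && st2'.isEmpty) := by
  induction cs with
  | nil =>
    intro st1 st2 st3 flag word hlen _
    simp only [checkLoop, checkPass1, checkPass2]
    cases st1 <;> cases st2 <;> cases st3 <;> simp_all
    all_goals omega
  | cons c rest ih =>
    intro st1 st2 st3 flag word hlen hword
    by_cases hlt : c = '<'
    · -- '<' : push, flag := true, no word change, no flush
      subst hlt
      have hB : checkLoop ('<' :: rest) (st1.length : Int) st3 word flag =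
          checkLoop rest ((('<' :: st1).length : Int)) st3 word true := by
        simp [checkLoop]
      have hA : checkPass1 ('<' :: rest) st1 [] flag word =
          checkPass1 rest ('<' :: st1) [] true word := by
        simp [checkPass1]
      rw [hB, hA]
      exact ih ('<' :: st1) st2 st3 true word hlen (by simp)
    · by_cases hgt : c = '>'
      · subst hgt
        cases st1 with
        | nil =>
          -- stray '>' : both sides False
          simp [checkLoop, checkPass1, hlt]
        | cons x t =>
          have hd : ¬ (((x :: t).length : Int) = 0) := by
            simp only [List.length_cons]; omega
          have hd1 : (((x :: t).length : Int)) - 1 = ((t.length : Int)) := by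
            simp only [List.length_cons]; push_cast; ring
          by_cases hw : word = []
          · -- empty tag: nothing flushed, nothing pushed
            subst hw
            have hB : checkLoop ('>' :: rest) (((x :: t).length : Int)) st3 [] flag =
                checkLoop rest ((((x :: t).length : Int)) - 1) st3 [] false := by
              simp only [checkLoop, reduceIte, if_neg hd,
                if_neg (show ¬('>' : Char) = '<' by decide),
                if_neg (show ¬(([] : List Char) ≠ []) from fun h => h rfl)]
            have hA : checkPass1 ('>' :: rest) (x :: t) [] flag [] =
                checkPass1 rest t [] false [] := by
              simp [checkPass1]
            rw [hB, hd1, hA]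
            exact ih t st2 st3 false [] hlen (fun _ => rfl)
          · -- flush word as one tag; A defers it to pass 2, B handles it now
            have hA : checkPass1 ('>' :: rest) (x :: t) [] flag word =
                (checkPass1 rest t [] false []).map (fun p => (p.1, word :: p.2)) := by
              have h1 : checkPass1 ('>' :: rest) (x :: t) [] flag word =
                  checkPass1 rest t [word] false [] := by
                simp [checkPass1, hw]
              rw [h1, checkPass1_spis]
              rfl
            by_cases hop : word.head? = some '/'
            · -- closing tag
              cases st3 with
              | nil =>
                -- empty stack in both: B returns False; A's pass 2 hits empty stack2
                have h2 : st2 = [] := by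
                  cases st2 with
                  | nil => rfl
                  | cons y t2 => simp at hlen
                subst h2
                have hB0 : checkLoop ('>' :: rest) (((x :: t).length : Int)) [] word flag =
                    false := by
                  simp only [checkLoop, reduceIte, if_neg hd, if_pos hw, if_pos hop,
                    if_neg (show ¬('>' : Char) = '<' by decide)]
                rw [hB0, hA]
                cases hP : checkPass1 rest t [] false [] with
                | none => simp
                | some p => simp [checkPass2, hop]
              | cons top t3 =>
                obtain ⟨y, t2, rfl⟩ : ∃ y t2, st2 = y :: t2 := by
                  cases st2 with
                  | nil => simp at hlen
                  | cons y t2 => exact ⟨y, t2, rfl⟩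
                have hlen2 : t2.length = t3.length := by simpa using hlen
                by_cases hm : word.drop 1 = top
                · -- matching close: pop
                  have hB0 : checkLoop ('>' :: rest) (((x :: t).length : Int))
                      (top :: t3) word flag =
                      checkLoop rest ((((x :: t).length : Int)) - 1) t3 [] false := by
                    simp only [checkLoop, reduceIte, if_neg hd, if_pos hw, if_pos hop,
                      if_pos hm, if_neg (show ¬('>' : Char) = '<' by decide)]
                  rw [hB0, hd1, hA, ih t t2 t3 false [] hlen2 (fun _ => rfl)]
                  cases hP : checkPass1 rest t [] false [] with
                  | none => simp
                  | some p => simp [checkPass2, hop, hm, -List.drop_one]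
                · -- mismatching close: both False
                  have hB0 : checkLoop ('>' :: rest) (((x :: t).length : Int))
                      (top :: t3) word flag = false := by
                    simp only [checkLoop, reduceIte, if_neg hd, if_pos hw, if_pos hop,
                      if_neg hm, if_neg (show ¬('>' : Char) = '<' by decide)]
                  rw [hB0, hA]
                  cases hP : checkPass1 rest t [] false [] with
                  | none => simp
                  | some p => simp [checkPass2, hop, hm, -List.drop_one]
            · -- opening tag: push the name
              have hB0 : checkLoop ('>' :: rest) (((x :: t).length : Int)) st3 word flag =
                  checkLoop rest ((((x :: t).length : Int)) - 1) (word :: st3) [] false := by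
                simp only [checkLoop, reduceIte, if_neg hd, if_pos hw, if_neg hop,
                  if_neg (show ¬('>' : Char) = '<' by decide)]
              rw [hB0, hd1, hA,
                ih t (1 :: st2) (word :: st3) false [] (by simpa using hlen) (fun _ => rfl)]
              cases hP : checkPass1 rest t [] false [] with
              | none => simp
              | some p => simp [checkPass2, hop]
      · -- ordinary character
        have hB : checkLoop (c :: rest) (st1.length : Int) st3 word flag =
            (if flag then checkLoop rest (st1.length : Int) st3 (word ++ [c]) flag
             else checkLoop rest (st1.length : Int) st3 word flag) := by
          simp only [checkLoop, if_neg hlt, if_neg hgt]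
        cases flag with
        | true =>
          have hA : checkPass1 (c :: rest) st1 [] true word =
              checkPass1 rest st1 [] true (word ++ [c]) := by
            simp [checkPass1, hlt, hgt]
          rw [hB, if_pos rfl, hA]
          exact ih st1 st2 st3 true (word ++ [c]) hlen (by simp)
        | false =>
          have hw : word = [] := hword rfl
          subst hw
          have hA : checkPass1 (c :: rest) st1 [] false [] =
              checkPass1 rest st1 [] false [] := by
            simp [checkPass1, hlt, hgt]
          rw [hB, if_neg (by simp), hA]
          exact ih st1 st2 st3 false [] hlen (fun _ => rfl)

-- ===== VERDICT (by name: the statement is the Claim_ definition above) =====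
theorem check_spec : Claim_equal_check := by
  intro s _
  unfold Spec_check check check_alt
  have h := checkLoop_sim s.toList [] [] [] false [] rfl (fun _ => rfl)
  simp only [List.length_nil, Int.natCast_zero] at h
  rw [h]
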